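-- pv_equiv track=rewrite | github.com/austinmm/WSU_CptS_355 | Assignment3/Assignment3.py | lookupVal
-- ===== SOURCE A (Python) =====
-- def lookupVal(L, k):
--     # L: List of Dictionaries
--     # k: Key
--     size = len(L)
--     # end of list
--     index = size - 1
--     # Checks each dictionary in L, starting from the end of the list
--     for i in range(size):
--         dictionary = L[index]
--         for x, y in dictionary.items():
--             # If k appears in a dictionary, lookupVal returns the value for key k.
--             if x == k:
--                 return y
--             else:
--                 continue
--         index -=1
--     return None
-- ===== SOURCE B (Python) =====
-- def lookupVal(L, k):
--     # Single forward pass: keep the value of the most recent dict containing k.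
--     # The last match found going forward equals A's first match scanning from the end.
--     result = None
--     for d in L:
--         if k in d:
--             result = d[k]
--     return result
-- ===== Notes on version B (the rewrite author's own statement) =====
-- stated objective: simpler
-- what changed: Replaces the reverse index-based scan with early return (and a hand-written items() loop per dict) by a single forward pass over L keeping the most recent match in an accumulator.
import Mathlib
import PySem

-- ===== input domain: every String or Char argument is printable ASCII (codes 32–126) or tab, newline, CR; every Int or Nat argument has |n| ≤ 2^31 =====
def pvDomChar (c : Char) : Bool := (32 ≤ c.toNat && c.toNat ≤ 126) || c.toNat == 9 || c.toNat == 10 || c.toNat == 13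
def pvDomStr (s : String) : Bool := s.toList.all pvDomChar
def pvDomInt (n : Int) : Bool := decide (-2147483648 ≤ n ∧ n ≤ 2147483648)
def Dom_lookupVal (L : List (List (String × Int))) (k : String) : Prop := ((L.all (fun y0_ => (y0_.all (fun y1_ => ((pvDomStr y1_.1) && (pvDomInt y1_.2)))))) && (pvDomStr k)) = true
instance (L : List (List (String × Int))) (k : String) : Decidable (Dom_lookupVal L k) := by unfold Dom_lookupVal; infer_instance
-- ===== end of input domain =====

-- B replaces A's reverse indexed scan with early return by a forward fold keeping the last match; equal return values proved below.

-- ===== PORT A =====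
-- inner 'for x, y in dictionary.items(): if x == k: return y else: continue'
def lookupValItems (items : List (String × Int)) (k : String) : Option Int :=
  match items with
  | [] => none
  | (x, y) :: rest => if x = k then some y else lookupValItems rest k

-- outer 'for i in range(size): dictionary = L[index] … ; index -= 1' (is only drives the iteration count, like i)
def lookupValLoop (is : List Int) (L : List (List (String × Int))) (k : String) (index : Int) : Option Int :=
  match is with
  | [] => none
  | _ :: rest =>
    match PySem.List.pyGet? L index with
    | none => none   -- unreachable: index stays in range; guard only makes the port total
    | some dictionary =>
      match lookupValItems dictionary k with
      | some y => some y
      | none => lookupValLoop rest L k (index - 1)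

def lookupVal (L : List (List (String × Int))) (k : String) : Option Int :=
  let size : Int := L.length
  let index : Int := size - 1
  lookupValLoop (PySem.List.pyRange 0 size 1) L k index

-- ===== PORT B =====
-- 'result = None; for d in L: if k in d: result = d[k]; return result'
def lookupVal_alt (L : List (List (String × Int))) (k : String) : Option Int :=
  L.foldl (fun result d =>
    match List.lookup k d with
    | some v => some v
    | none => result) none

-- ===== PRECONDITION & SPEC =====
def Spec_lookupVal (L : List (List (String × Int))) (k : String) (out : Option Int) : Prop := out = lookupVal_alt L k
instance (L : List (List (String × Int))) (k : String) (out : Option Int) : Decidable (Spec_lookupVal L k out) := by unfold Spec_lookupVal; infer_instance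

-- ===== CLAIM (what is proved, stated in full; the proofs are below) =====
def Claim_equal_lookupVal : Prop := ∀ (L : List (List (String × Int))) (k : String), Dom_lookupVal L k → Spec_lookupVal L k (lookupVal L k)

-- ===== LEMMAS AND PROOFS =====

-- first match scanning the reversed list (shared characterisation of both ports)
def revFind (Ls : List (List (String × Int))) (k : String) : Option Int :=
  match Ls with
  | [] => none
  | d :: rest =>
    match lookupValItems d k with
    | some y => some y
    | none => revFind rest k

theorem lookupValItems_eq_lookup (d : List (String × Int)) (k : String) :
    lookupValItems d k = List.lookup k d := by
  induction d with
  | nil => rfl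
  | cons p rest ih =>
    obtain ⟨x, y⟩ := p
    by_cases h : x = k
    · subst h; simp [lookupValItems, List.lookup]
    · have hb : (k == x) = false := beq_eq_false_iff_ne.mpr (fun e => h e.symm)
      simp [lookupValItems, List.lookup, ih, h, hb]

-- the loop only uses the length of is
def lookupValLoopN (n : Nat) (L : List (List (String × Int))) (k : String) (index : Int) : Option Int :=
  match n with
  | 0 => none
  | n + 1 =>
    match PySem.List.pyGet? L index with
    | none => none
    | some dictionary =>
      match lookupValItems dictionary k with
      | some y => some y
      | none => lookupValLoopN n L k (index - 1)

theorem loop_eq_loopN (is : List Int) (L : List (List (String × Int))) (k : String) (index : Int) :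
    lookupValLoop is L k index = lookupValLoopN is.length L k index := by
  induction is generalizing index with
  | nil => rfl
  | cons i rest ih =>
    simp only [lookupValLoop, lookupValLoopN, List.length_cons, ih]

theorem loopN_spec (n : Nat) (L : List (List (String × Int))) (k : String)
    (hn : n ≤ L.length) :
    lookupValLoopN n L k ((n : Int) - 1) = revFind ((L.take n).reverse) k := by
  induction n with
  | zero => rfl
  | succ m ih =>
    have hm : m < L.length := by omega
    have htake : L.take (m + 1) = L.take m ++ [L[m]] := List.take_succ_eq_append_getElem hm
    have hidx : ((m : Int) + 1 - 1) = (m : Int) := by ring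
    have hget : PySem.List.pyGet? L ((m : Int)) = some L[m] := PySem.List.pyGet?_ofNat L m hm
    simp only [lookupValLoopN, Nat.cast_add, Nat.cast_one, hidx, hget]
    rw [htake]
    simp only [List.reverse_append, List.reverse_singleton, List.singleton_append, revFind]
    cases h : lookupValItems L[m] k with
    | some y => rfl
    | none =>
      exact ih (by omega)

theorem altB_eq_revFind (L : List (List (String × Int))) (k : String) :
    lookupVal_alt L k = revFind L.reverse k := by
  induction L using List.reverseRecOn with
  | nil => rfl
  | append_singleton M d ih =>
    simp only [lookupVal_alt, List.foldl_append, List.foldl_cons, List.foldl_nil,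
      List.reverse_append, List.reverse_singleton, List.singleton_append, revFind,
      ← lookupValItems_eq_lookup]
    cases h : lookupValItems d k with
    | some y => rfl
    | none =>
      rw [show (List.foldl (fun result d =>
          match lookupValItems d k with
          | some v => some v
          | none => result) none M) = lookupVal_alt M k from by
        simp [lookupVal_alt, lookupValItems_eq_lookup]]
      exact ih

-- ===== VERDICT (by name: the statement is the Claim_ definition above) =====
theorem lookupVal_spec : Claim_equal_lookupVal := by
  intro L k _
  show lookupVal L k = lookupVal_alt L k
  unfold lookupVal
  rw [loop_eq_loopN, PySem.List.length_pyRange_one]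
  have h0 : ((L.length : Int) - 0).toNat = L.length := by omega
  rw [h0, loopN_spec L.length L k (le_refl _), List.take_length, altB_eq_revFind]
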